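-- pv_equiv track=rewrite | github.com/alexandraback/datacollection | solutions_5630113748090880_1/Python/Dragonpig/main.py | solve
-- ===== SOURCE A (Python) =====
-- def solve(rows):
--     m = {}
--     for row in rows:
--         for col in row:
--             if col in m:
--                 m[col] += 1
--             else:
--                 m[col] = 1
--
--     missing = []
--
--     for (key, val) in m.items():
--         if val % 2 == 1:
--             missing.append(int(key))
--
--     missing.sort()
--
--     return ' '.join(str(x) for x in missing)
-- ===== SOURCE B (Python) =====
-- def solve(rows):
--     # parity via membership toggling: after the loops, `odd` holds exactly
--     # the strings seen an odd number of times
--     odd = set()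
--     for row in rows:
--         for col in row:
--             if col in odd:
--                 odd.discard(col)
--             else:
--                 odd.add(col)
--     missing = sorted(int(x) for x in odd)
--     return ' '.join(str(x) for x in missing)
-- ===== Notes on version B (the rewrite author's own statement) =====
-- stated objective: idiomatic
-- what changed: Replaces the count dict plus a separate %2 selection pass by a set whose membership is toggled per occurrence, so it directly holds the odd-count elements; then sorts their int values.
import Mathlib
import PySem

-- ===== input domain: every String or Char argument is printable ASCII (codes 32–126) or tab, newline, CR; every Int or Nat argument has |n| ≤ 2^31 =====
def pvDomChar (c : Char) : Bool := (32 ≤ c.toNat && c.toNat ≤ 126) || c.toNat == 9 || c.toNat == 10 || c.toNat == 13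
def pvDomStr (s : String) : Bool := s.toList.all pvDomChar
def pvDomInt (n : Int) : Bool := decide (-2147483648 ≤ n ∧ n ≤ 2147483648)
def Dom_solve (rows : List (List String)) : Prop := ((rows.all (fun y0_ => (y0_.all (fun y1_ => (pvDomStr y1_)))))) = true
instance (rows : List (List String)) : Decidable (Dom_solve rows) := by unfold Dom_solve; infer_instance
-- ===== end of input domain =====

-- B replaces the count dict and the separate %2 selection pass by a membership-toggled
-- set that holds exactly the odd-count elements (idiomatic; same cost).

-- ===== PORT A =====
-- `m[col] += 1` reads m[col], which exists in that branch, so `m.getD col 0 + 1` is exact there.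
def solve (rows : List (List String)) : String :=
  let m : PySem.Dict String Int :=
    rows.foldl (fun m row =>
      row.foldl (fun m col =>
        if m.contains col then m.insert col (m.getD col 0 + 1)
        else m.insert col 1) m) PySem.Dict.empty
  let missing : List Int :=
    m.items.foldl (fun acc kv =>
      if PySem.Int.mod kv.2 2 == 1 then acc ++ [(PySem.Int.ofStr? kv.1).getD 0] else acc) []
  let missing := PySem.List.sorted missing (fun x => x) false
  PySem.Str.join " " (missing.map PySem.Int.toStr)

-- ===== PORT B =====
def solve_alt (rows : List (List String)) : String :=
  let odd : PySem.Set String :=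
    rows.foldl (fun s row =>
      row.foldl (fun s col =>
        if PySem.Set.contains s col then PySem.Set.discard s col
        else PySem.Set.add s col) s) PySem.Set.empty
  let missing : List Int :=
    PySem.List.sorted (odd.map (fun x => (PySem.Int.ofStr? x).getD 0)) (fun x => x) false
  PySem.Str.join " " (missing.map PySem.Int.toStr)

-- ===== PRECONDITION & SPEC =====
-- Pre_ excludes exactly the inputs where Python raises ValueError: some string occurring an
-- odd number of times is not a valid int literal (int(key) raises; B's int(x) raises there too).
def Pre_solve (rows : List (List String)) : Prop :=
  ∀ s ∈ rows.flatten, rows.flatten.count s % 2 = 1 → (PySem.Int.ofStr? s).isSome = true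
instance (rows : List (List String)) : Decidable (Pre_solve rows) := by unfold Pre_solve; infer_instance

def pvWitness_solve : List (List String) := [["1", "2"], ["2"]]

def Spec_solve (rows : List (List String)) (out : String) : Prop := out = solve_alt rows
instance (rows : List (List String)) (out : String) : Decidable (Spec_solve rows out) := by unfold Spec_solve; infer_instance

-- ===== CLAIM (what is proved, stated in full; the proofs are below) =====
def Claim_equal_solve : Prop := ∀ (rows : List (List String)), Dom_solve rows → Pre_solve rows → Spec_solve rows (solve rows)

-- ===== LEMMAS AND PROOFS =====

-- A's counting loop is Counter(flatten(rows))
theorem solve_count_loop (rows : List (List String)) :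
    rows.foldl (fun m row =>
      row.foldl (fun m col =>
        if m.contains col then m.insert col (m.getD col 0 + 1)
        else m.insert col 1) m) PySem.Dict.empty
    = PySem.Dict.counter rows.flatten := by
  have hbody : (fun (m : PySem.Dict String Int) col =>
        if m.contains col then m.insert col (m.getD col 0 + 1) else m.insert col 1)
      = fun m col => m.insert col (m.getD col 0 + 1) := by
    funext m col
    by_cases hc : m.contains col = true
    · rw [if_pos hc]
    · rw [if_neg hc, PySem.Dict.getD_of_not_contains m 0 (by simpa using hc)]; norm_num
  rw [hbody, ← List.foldl_flatten, PySem.Dict.foldl_insert_getD_add_one_eq_counter]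

-- one toggle step: membership flips exactly at the toggled element
theorem toggle_step_mem (s : PySem.Set String) (c x : String) :
    (x ∈ if PySem.Set.contains s c then PySem.Set.discard s c else PySem.Set.add s c)
      ↔ ¬ (x ∈ s ↔ x = c) := by
  by_cases hc : PySem.Set.contains s c = true
  · have hcs : c ∈ s := (PySem.Set.contains_iff s c).1 hc
    rw [if_pos hc, PySem.Set.mem_discard]
    by_cases hx : x = c
    · subst hx; simp [hcs]
    · simp [hx]
  · have hcs : c ∉ s := fun h => hc ((PySem.Set.contains_iff s c).2 h)
    rw [if_neg hc, PySem.Set.mem_add]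
    by_cases hx : x = c
    · subst hx; simp [hcs]
    · simp [hx]

-- the toggling loop keeps the set duplicate-free
theorem toggle_nodup (l : List String) (s : PySem.Set String) (hs : s.Nodup) :
    (l.foldl (fun s col => if PySem.Set.contains s col then PySem.Set.discard s col
        else PySem.Set.add s col) s).Nodup := by
  induction l generalizing s with
  | nil => simpa using hs
  | cons c l ih =>
    rw [List.foldl_cons]
    apply ih
    by_cases hc : PySem.Set.contains s c = true
    · rw [if_pos hc]; exact PySem.Set.nodup_discard s c hs
    · rw [if_neg hc]; exact PySem.Set.nodup_add s c hs

-- the toggling loop: membership in the accumulated set tracks the parity of the count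
theorem toggle_invariant (l : List String) (s : PySem.Set String) (x : String) :
    x ∈ l.foldl (fun s col => if PySem.Set.contains s col then PySem.Set.discard s col
        else PySem.Set.add s col) s ↔ ¬ (x ∈ s ↔ l.count x % 2 = 1) := by
  induction l generalizing s with
  | nil => simp
  | cons c l ih =>
    rw [List.foldl_cons, ih, toggle_step_mem]
    by_cases hx : x = c
    · subst hx
      rw [List.count_cons_self]
      have hpar : ((l.count x + 1) % 2 = 1) ↔ ¬ (l.count x % 2 = 1) := by omega
      by_cases hs' : x ∈ s <;> simp [hs', hpar]
    · have hcount : (c :: l).count x = l.count x := by simp [Ne.symm hx]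
      rw [hcount]
      simp [hx]

-- the Bool test A applies to a count, as a parity condition
theorem mod_count_test (c : Nat) :
    (PySem.Int.mod (c : Int) 2 == 1) = decide (c % 2 = 1) := by
  have h : PySem.Int.mod (c : Int) 2 = ((c % 2 : Nat) : Int) := by
    exact_mod_cast PySem.Int.mod_natCast c 2
  rw [h]
  by_cases hp : c % 2 = 1
  · simp [hp]
  · simp [hp]; omega

-- the two unsorted int lists are permutations of each other
theorem missing_perm (l : List String) :
    ((PySem.Dict.counter l).items.foldl (fun acc kv =>
        if PySem.Int.mod kv.2 2 == 1 then acc ++ [(PySem.Int.ofStr? kv.1).getD 0] else acc)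
        []).Perm
      ((l.foldl (fun s col => if PySem.Set.contains s col then PySem.Set.discard s col
        else PySem.Set.add s col) PySem.Set.empty).map (fun x => (PySem.Int.ofStr? x).getD 0)) := by
  rw [PySem.List.foldl_append_if (fun kv : String × Int => PySem.Int.mod kv.2 2 == 1)
      (fun kv => (PySem.Int.ofStr? kv.1).getD 0), List.nil_append,
    PySem.Dict.items_counter, List.filter_map, List.map_map]
  apply List.Perm.map
  apply (List.perm_ext_iff_of_nodup (List.Nodup.filter _ (PySem.Set.nodup_ofList l))
    (toggle_nodup l PySem.Set.empty (by simp [PySem.Set.empty]))).2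
  intro x
  rw [toggle_invariant l PySem.Set.empty x]
  have hempty : x ∉ (PySem.Set.empty : PySem.Set String) := by simp [PySem.Set.empty]
  simp only [List.mem_filter, PySem.Set.mem_ofList, Function.comp, mod_count_test,
    decide_eq_true_eq, hempty, false_iff]
  constructor
  · rintro ⟨-, hodd⟩; simpa using hodd
  · intro h
    have hodd : l.count x % 2 = 1 := by simpa using h
    exact ⟨List.count_pos_iff.1 (by omega), hodd⟩

-- ===== VERDICT (by name: the statement is the Claim_ definition above) =====
theorem solve_spec : Claim_equal_solve := by
  intro rows _ _
  unfold Spec_solve solve solve_alt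
  rw [solve_count_loop, ← List.foldl_flatten]
  exact congrArg (fun L => PySem.Str.join " " (L.map PySem.Int.toStr))
    ((PySem.List.sorted_id_eq_sorted_id_iff_perm _ _).2 (missing_perm rows.flatten))
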